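-- pv_equiv track=rewrite | github.com/jacharrym/MC-Wick | wick.py | swapVector
-- ===== SOURCE A (Python) =====
-- fermions = True
--
-- bosons = False
--
-- def swapVector ( vector, auxSign ) :
--
-- 	auxVector = list()
-- 	outputVector = list(vector) #Copy the initial vector
-- 	for i in outputVector :
-- 		auxVector.append(i)
--
-- 	while not evaluateOrder (auxVector, False):
-- 		for j in range(0,len(auxVector)) :
-- 			jj = auxVector[j]
-- 			for k in range(j+1,len(auxVector)):
-- 				kk = auxVector[k]
-- 				if jj > kk :
--
-- 					indexToSwap = (j,k)
-- 					break
--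
-- 		## Swap
-- 		outputVector[indexToSwap[0]], outputVector[indexToSwap[1]] = outputVector[indexToSwap[1]], outputVector[indexToSwap[0]]
-- 		## Build the new auxiliary vector
-- 		auxVector = list()
-- 		for i in outputVector :
-- 			auxVector.append(i)
--
-- 		if fermions == True :
-- 			auxSign = auxSign * -1
-- 		if bosons == True :
-- 			auxSign = auxSign * 1
--
--
-- 	return outputVector, auxSign
--
-- def evaluateOrder ( vector, reverseMode ):
--
-- 	sortedVector = sorted(vector, reverse=reverseMode)
--
-- 	isSorted = True
-- 	for i in range(0, len(vector)) :
-- 		if vector[i] != sortedVector[i] :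
-- 			isSorted = False
--
-- 	return isSorted
-- ===== SOURCE B (Python) =====
-- def swapVector(vector, auxSign):
--     # One pass: sort once, and get the sign from the parity of the inversion
--     # count (each of A's transpositions removes exactly one inversion).
--     inv = 0
--     rest = list(vector)
--     while rest:
--         x = rest.pop(0)
--         for y in rest:
--             if y < x:
--                 inv += 1
--     return sorted(vector), (auxSign if inv % 2 == 0 else -auxSign)
-- ===== Notes on version B (the rewrite author's own statement) =====
-- stated objective: faster
-- what changed: B replaces A's repeated swap-selection loop (re-scan, swap, re-sort-check until sorted) by a single sorted() call plus one inversion-counting pass whose parity gives the sign, since each of A's transpositions removes exactly one inversion.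
import Mathlib
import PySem

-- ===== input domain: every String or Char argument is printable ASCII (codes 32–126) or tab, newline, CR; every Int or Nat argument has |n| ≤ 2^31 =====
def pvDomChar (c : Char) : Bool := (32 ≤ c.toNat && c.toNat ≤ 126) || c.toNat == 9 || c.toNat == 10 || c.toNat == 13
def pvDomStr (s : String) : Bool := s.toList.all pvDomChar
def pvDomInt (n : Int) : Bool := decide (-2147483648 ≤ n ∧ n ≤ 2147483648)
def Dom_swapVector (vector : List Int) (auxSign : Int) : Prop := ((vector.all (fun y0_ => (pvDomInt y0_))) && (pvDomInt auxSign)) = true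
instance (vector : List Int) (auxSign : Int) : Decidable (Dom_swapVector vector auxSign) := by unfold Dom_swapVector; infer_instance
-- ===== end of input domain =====

-- B replaces A's repeated swap-until-sorted loop by one sorted() call plus a single
-- inversion-counting pass whose parity gives the sign (objective: faster).

-- ===== PORT A =====

-- helper evaluateOrder: sorted(vector, reverse=reverseMode) compared index by index
-- (indices 0..len-1 are in range, so List.getD is exact for Python's vector[i]).
def evaluateOrder (vector : List Int) (reverseMode : Bool) : Bool :=
  let sortedVector := PySem.List.sorted vector (fun x => x) reverseMode
  (List.range vector.length).foldl
    (fun isSorted i => if vector.getD i 0 ≠ sortedVector.getD i 0 then false else isSorted)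
    true

-- inner 'for k in range(j+1, len(aux)) … break': first k > j with aux[j] > aux[k]
def findK (l : List Int) (j : Nat) : Option Nat :=
  (List.range' (j + 1) (l.length - (j + 1))).find? (fun k => decide (l.getD k 0 < l.getD j 0))

-- outer 'for j in range(0, len(aux))': indexToSwap keeps being overwritten, so the LAST j wins
def selectSwap (l : List Int) : Option (Nat × Nat) :=
  (List.range l.length).foldl
    (fun acc j => match findK l j with | some k => some (j, k) | none => acc)
    none

-- simultaneous assignment out[j], out[k] = out[k], out[j] (both values read first)
def swapAt (l : List Int) (j k : Nat) : List Int :=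
  (l.set j (l.getD k 0)).set k (l.getD j 0)

-- termination measure for A's while loop: number of out-of-order pairs
def invCount : List Int → Nat
  | [] => 0
  | x :: xs => xs.countP (fun y => decide (y < x)) + invCount xs

-- ----- termination lemmas, cited by swapLoop's decreasing_by -----

theorem find?_range'_spec (p : Nat → Bool) :
    ∀ (b a k : Nat), (List.range' a b).find? p = some k →
      p k = true ∧ a ≤ k ∧ k < a + b ∧ ∀ m, a ≤ m → m < k → p m = false := by
  intro b
  induction b with
  | zero => intro a k h; simp [List.range'] at h
  | succ b ih =>
    intro a k h
    rw [List.range'_succ, List.find?_cons] at h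
    by_cases hpa : p a
    · simp only [hpa] at h
      injection h with h
      subst h
      exact ⟨hpa, le_refl _, by omega, fun m h1 h2 => absurd h1 (by omega)⟩
    · rw [Bool.not_eq_true] at hpa
      simp only [hpa] at h
      obtain ⟨h1, h2, h3, h4⟩ := ih (a + 1) k h
      refine ⟨h1, by omega, by omega, fun m hm1 hm2 => ?_⟩
      rcases Nat.eq_or_lt_of_le hm1 with rfl | hlt
      · exact hpa
      · exact h4 m (by omega) hm2

theorem selectSwap_last (l : List Int) :
    ∀ (n j k : Nat),
      (List.range n).foldl
        (fun acc j => match findK l j with | some k' => some (j, k') | none => acc) none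
        = some (j, k) →
      findK l j = some k ∧ j < n ∧ ∀ m, j < m → m < n → findK l m = none := by
  intro n
  induction n with
  | zero => intro j k h; simp at h
  | succ n ih =>
    intro j k h
    rw [List.range_succ, List.foldl_append] at h
    simp only [List.foldl_cons, List.foldl_nil] at h
    cases hfn : findK l n with
    | some k' =>
      simp only [hfn] at h
      obtain ⟨rfl, rfl⟩ : n = j ∧ k' = k := by
        injection h with h; exact Prod.mk.inj h
      exact ⟨hfn, by omega, fun m h1 h2 => absurd h1 (by omega)⟩
    | none =>
      simp only [hfn] at h
      obtain ⟨h1, h2, h3⟩ := ih j k h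
      refine ⟨h1, by omega, fun m hm1 hm2 => ?_⟩
      rcases Nat.lt_succ_iff_lt_or_eq.mp hm2 with hlt | rfl
      · exact h3 m hm1 hlt
      · exact hfn

theorem findK_none (l : List Int) (j : Nat) (h : findK l j = none) :
    ∀ k, j < k → k < l.length → ¬ l.getD k 0 < l.getD j 0 := by
  intro k h1 h2 hlt
  rw [findK, List.find?_eq_none] at h
  exact h k (List.mem_range'_1.mpr ⟨by omega, by omega⟩) (by simpa using hlt)

theorem select_adjacent (l : List Int) (j k : Nat) (h : selectSwap l = some (j, k)) :
    k = j + 1 ∧ j + 1 < l.length ∧ l.getD (j + 1) 0 < l.getD j 0 := by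
  obtain ⟨h1, h2, h3⟩ := selectSwap_last l l.length j k h
  obtain ⟨hp, hk1, hk2, hfirst⟩ := find?_range'_spec _ _ _ _ h1
  have hkn : k < l.length := by omega
  have hjk : l.getD k 0 < l.getD j 0 := by simpa using hp
  have hkeq : k = j + 1 := by
    by_contra hne
    have hm : j + 1 < k := by omega
    -- position j+1 is ≥ l[j] (first match at k) yet itself beats position k,
    -- so findK (j+1) ≠ none, contradicting that j is the LAST index with an inversion
    have hge : ¬ l.getD (j+1) 0 < l.getD j 0 := by
      have := hfirst (j+1) (by omega) hm
      simpa using this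
    have : l.getD k 0 < l.getD (j+1) 0 := by
      rcases lt_or_ge (l.getD k 0) (l.getD (j+1) 0) with h' | h'
      · exact h'
      · exact absurd (lt_of_le_of_lt h' hjk) hge
    have hnone := h3 (j+1) (by omega) (by omega)
    exact findK_none l (j+1) hnone k hm hkn this
  subst hkeq
  exact ⟨rfl, hkn, hjk⟩

theorem swapAt_zero (x y : Int) (t : List Int) : swapAt (x :: y :: t) 0 1 = y :: x :: t := by
  simp [swapAt]

theorem swapAt_succ (a : Int) (l : List Int) (j : Nat) :
    swapAt (a :: l) (j + 1) (j + 2) = a :: swapAt l j (j + 1) := by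
  simp [swapAt]

-- an adjacent out-of-order swap removes EXACTLY ONE inversion (and is a permutation)
theorem swap_dec : ∀ (j : Nat) (l : List Int), j + 1 < l.length →
    l.getD (j + 1) 0 < l.getD j 0 →
    invCount (swapAt l j (j + 1)) + 1 = invCount l ∧ (swapAt l j (j + 1)).Perm l := by
  intro j
  induction j with
  | zero =>
    intro l hlen hlt
    match l with
    | x :: y :: t =>
      simp only [List.getD_cons_succ, List.getD_cons_zero] at hlt
      rw [show (0:Nat) + 1 = 1 from rfl, swapAt_zero]
      constructor
      · simp only [invCount, List.countP_cons]
        have h1 : decide (y < x) = true := by simpa using hlt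
        have h2 : decide (x < y) = false := by simp; omega
        rw [h1, h2]
        simp only [if_true]
        simp only [Bool.false_eq_true, if_false]
        omega
      · exact List.Perm.swap x y t
  | succ j ih =>
    intro l hlen hlt
    match l with
    | a :: l' =>
      simp only [List.getD_cons_succ] at hlt
      have hlen' : j + 1 < l'.length := by simpa using Nat.lt_of_succ_lt_succ hlen
      rw [show j + 1 + 1 = j + 2 from rfl, swapAt_succ]
      obtain ⟨hinv, hperm⟩ := ih l' hlen' hlt
      constructor
      · simp only [invCount]
        rw [hperm.countP_eq]
        omega
      · exact hperm.cons a

-- A's while loop (fermions = True, so every swap multiplies the sign by -1)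
def swapLoop (l : List Int) (sign : Int) : List Int × Int :=
  if evaluateOrder l false = true then (l, sign)
  else
    match h : selectSwap l with
    | none => (l, sign)  -- unreachable under the guard (Python would hit NameError); totality only
    | some (j, k) => swapLoop (swapAt l j k) (sign * -1)
termination_by invCount l
decreasing_by
  obtain ⟨hk, hlen, hlt⟩ := select_adjacent l j k h
  subst hk
  have := (swap_dec j l hlen hlt).1
  omega

def swapVector (vector : List Int) (auxSign : Int) : List Int × Int :=
  -- outputVector = list(vector); auxVector re-copies it each round (identical immutable lists here)
  swapLoop vector auxSign

-- ===== PORT B =====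

-- 'while rest: x = rest.pop(0); for y in rest: if y < x: inv += 1'
def invLoopB : List Int → Int → Int
  | [], inv => inv
  | x :: rest, inv => invLoopB rest (rest.foldl (fun a y => if y < x then a + 1 else a) inv)

def swapVector_alt (vector : List Int) (auxSign : Int) : List Int × Int :=
  let inv := invLoopB vector 0
  (PySem.List.sorted vector (fun x => x) false,
    if PySem.Int.mod inv 2 = 0 then auxSign else -auxSign)

-- ===== PRECONDITION & SPEC =====
def Spec_swapVector (vector : List Int) (auxSign : Int) (out : List Int × Int) : Prop := out = swapVector_alt vector auxSign
instance (vector : List Int) (auxSign : Int) (out : List Int × Int) : Decidable (Spec_swapVector vector auxSign out) := by unfold Spec_swapVector; infer_instance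

-- ===== CLAIM (what is proved, stated in full; the proofs are below) =====
def Claim_equal_swapVector : Prop := ∀ (vector : List Int) (auxSign : Int), Dom_swapVector vector auxSign → Spec_swapVector vector auxSign (swapVector vector auxSign)

-- ===== LEMMAS AND PROOFS =====

theorem invCount_eq_zero_of_pairwise (l : List Int) (h : l.Pairwise (· ≤ ·)) :
    invCount l = 0 := by
  induction l with
  | nil => rfl
  | cons x xs ih =>
    rw [List.pairwise_cons] at h
    simp only [invCount, ih h.2, Nat.add_zero]
    rw [List.countP_eq_zero]
    intro y hy
    simpa using not_lt.mpr (h.1 y hy)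

theorem selectSwap_some_of_not_pairwise (l : List Int) (h : ¬ l.Pairwise (· ≤ ·)) :
    ∃ j k, selectSwap l = some (j, k) := by
  cases hsel : selectSwap l with
  | some jk => exact ⟨jk.1, jk.2, by simp⟩
  | none =>
    exfalso
    apply h
    -- selectSwap = none means every findK is none, so no out-of-order pair exists
    have hall : ∀ m, m < l.length → findK l m = none := by
      have : ∀ (n : Nat),
          (List.range n).foldl
            (fun acc j => match findK l j with | some k' => some (j, k') | none => acc) none
            = none →
          ∀ m, m < n → findK l m = none := by
        intro n
        induction n with
        | zero => intro _ m hm; omega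
        | succ n ih =>
          intro hfold m hm
          rw [List.range_succ, List.foldl_append] at hfold
          simp only [List.foldl_cons, List.foldl_nil] at hfold
          cases hfn : findK l n with
          | some k' => simp [hfn] at hfold
          | none =>
            simp only [hfn] at hfold
            rcases Nat.lt_succ_iff_lt_or_eq.mp hm with hlt | rfl
            · exact ih hfold m hlt
            · exact hfn
      exact this l.length hsel
    rw [List.pairwise_iff_getElem]
    intro i j hi hj hij
    have := findK_none l i (hall i hi) j hij hj
    rw [List.getD_eq_getElem l 0 hj, List.getD_eq_getElem l 0 hi] at this
    omega

theorem foldl_check (f : Nat → Prop) [DecidablePred f] :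
    ∀ (n : Nat) (b : Bool),
      (List.range n).foldl (fun acc i => if ¬ f i then false else acc) b = true ↔
        b = true ∧ ∀ i, i < n → f i := by
  intro n
  induction n with
  | zero => intro b; simp
  | succ n ih =>
    intro b
    rw [List.range_succ, List.foldl_append]
    simp only [List.foldl_cons, List.foldl_nil]
    by_cases hf : f n
    · rw [if_neg (by simpa using hf)]
      rw [ih b]
      constructor
      · rintro ⟨hb, hall⟩
        exact ⟨hb, fun i hi => by rcases Nat.lt_succ_iff_lt_or_eq.mp hi with h | rfl; exacts [hall i h, hf]⟩
      · rintro ⟨hb, hall⟩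
        exact ⟨hb, fun i hi => hall i (by omega)⟩
    · rw [if_pos (by simpa using hf)]
      constructor
      · intro h; cases h
      · rintro ⟨_, hall⟩; exact absurd (hall n (by omega)) hf

theorem evaluateOrder_true_iff (l : List Int) :
    evaluateOrder l false = true ↔ l = PySem.List.sorted l (fun x => x) false := by
  unfold evaluateOrder
  simp only []
  rw [foldl_check (fun i => l.getD i 0 = (PySem.List.sorted l (fun x => x) false).getD i 0) l.length true]
  have hlen : (PySem.List.sorted l (fun x => x) false).length = l.length :=
    PySem.List.length_sorted l (fun x => x) false
  constructor
  · rintro ⟨_, hall⟩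
    apply List.ext_getElem (by omega)
    intro i hi hi'
    have := hall i hi
    rwa [List.getD_eq_getElem l 0 hi, List.getD_eq_getElem _ 0 hi'] at this
  · intro heq
    exact ⟨rfl, fun i hi => by rw [← heq]⟩

theorem swapLoop_eq (n : Nat) : ∀ (l : List Int) (sign : Int), invCount l = n →
    swapLoop l sign =
      (PySem.List.sorted l (fun x => x) false,
        if invCount l % 2 = 0 then sign else -sign) := by
  induction n using Nat.strong_induction_on with
  | _ n ih =>
    intro l sign hn
    rw [swapLoop]
    by_cases hev : evaluateOrder l false = true
    · rw [if_pos hev]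
      have heq := (evaluateOrder_true_iff l).mp hev
      have hpw : l.Pairwise (· ≤ ·) := by
        rw [heq]
        simpa using PySem.List.sorted_pairwise l (fun x => x)
      rw [invCount_eq_zero_of_pairwise l hpw]
      simp [← heq]
    · rw [if_neg hev]
      have hnpw : ¬ l.Pairwise (· ≤ ·) := by
        intro hpw
        exact hev ((evaluateOrder_true_iff l).mpr (PySem.List.sorted_eq_self_of_pairwise l (fun x => x) (by simpa using hpw)).symm)
      split
      next hsel =>
        obtain ⟨j, k, hsome⟩ := selectSwap_some_of_not_pairwise l hnpw
        rw [hsel] at hsome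
        cases hsome
      next j k hsel =>
      obtain ⟨hk, hlen, hlt⟩ := select_adjacent l j k hsel
      subst hk
      obtain ⟨hinv, hperm⟩ := swap_dec j l hlen hlt
      have hrec := ih (invCount (swapAt l j (j+1))) (by omega) (swapAt l j (j+1)) (sign * -1) rfl
      rw [hrec]
      have hsort : PySem.List.sorted (swapAt l j (j+1)) (fun x => x) false
          = PySem.List.sorted l (fun x => x) false :=
        PySem.List.sorted_eq_sorted_of_perm _ _ _ (fun a b h => h) hperm
      rw [hsort]
      by_cases hp : invCount l % 2 = 0
      · rw [if_neg (by omega), if_pos hp]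
        simp only [Prod.mk.injEq]
        exact ⟨trivial, by omega⟩
      · rw [if_pos (by omega), if_neg hp]
        simp only [Prod.mk.injEq]
        exact ⟨trivial, by omega⟩

theorem invLoopB_eq (l : List Int) : ∀ (a : Int), invLoopB l a = a + (invCount l : Int) := by
  induction l with
  | nil => intro a; simp [invLoopB, invCount]
  | cons x rest ih =>
    intro a
    rw [invLoopB, ih, PySem.List.foldl_ite_add_one (fun y => y < x) rest a]
    simp only [invCount]
    push_cast
    ring

-- ===== VERDICT (by name: the statement is the Claim_ definition above) =====
theorem swapVector_spec : Claim_equal_swapVector := by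
  intro vector auxSign _
  unfold Spec_swapVector swapVector swapVector_alt
  rw [swapLoop_eq (invCount vector) vector auxSign rfl, invLoopB_eq vector 0]
  simp only [zero_add]
  have : PySem.Int.mod ((invCount vector : Int)) 2 = ((invCount vector % 2 : Nat) : Int) := by
    exact_mod_cast PySem.Int.mod_natCast (invCount vector) 2
  rw [this]
  rcases Nat.mod_two_eq_zero_or_one (invCount vector) with h | h <;> simp [h]
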